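-- pv_equiv track=rewrite | github.com/daniel-reich/ubiquitous-fiesta | kiX7WjSFeTmBYcEgK_14.py | major_sum
-- ===== SOURCE A (Python) =====
-- def major_sum(lst):
--   ps,ns,zc = 0,0,0
--   for x in lst:
--     if x > 0: ps += x
--     elif x < 0: ns += x
--     else: zc += 1
--
--   result = max(ps,abs(ns),zc)
--   if result == abs(ns): return ns
--   else: return result
-- ===== SOURCE B (Python) =====
-- def major_sum(lst):
--     ps = sum(x for x in lst if x > 0)
--     ns = sum(x for x in lst if x < 0)
--     zc = sum(1 for x in lst if x == 0)
--     result = max(ps, -ns, zc)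
--     return ns if result == -ns else result
-- ===== Notes on version B (the rewrite author's own statement) =====
-- stated objective: alternative
-- what changed: Replaces the single branching loop over mutable accumulators with three independent filtered aggregations (sum of positives, sum of negatives, zero count) and uses -ns instead of abs(ns) since ns is never positive.
import Mathlib
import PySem

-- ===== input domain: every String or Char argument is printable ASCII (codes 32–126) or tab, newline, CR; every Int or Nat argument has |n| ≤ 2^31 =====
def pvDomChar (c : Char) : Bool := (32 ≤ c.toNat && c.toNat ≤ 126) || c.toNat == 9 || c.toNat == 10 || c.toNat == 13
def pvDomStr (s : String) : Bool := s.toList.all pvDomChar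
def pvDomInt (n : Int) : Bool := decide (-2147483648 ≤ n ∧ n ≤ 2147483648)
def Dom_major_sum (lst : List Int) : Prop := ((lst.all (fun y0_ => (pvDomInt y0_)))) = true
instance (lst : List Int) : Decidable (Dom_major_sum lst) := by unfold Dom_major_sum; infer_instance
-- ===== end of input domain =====

-- B replaces A's single branching loop by three independent filtered aggregations (same O(n) cost, different decomposition).


-- ===== PORT A =====
-- one step of A's for-loop over the accumulator (ps, ns, zc)
def majorStep (s : Int × Int × Int) (x : Int) : Int × Int × Int :=
  if x > 0 then (s.1 + x, s.2.1, s.2.2)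
  else if x < 0 then (s.1, s.2.1 + x, s.2.2)
  else (s.1, s.2.1, s.2.2 + 1)

def major_sum (lst : List Int) : Int :=
  let s := lst.foldl majorStep (0, 0, 0)
  let result := max (max s.1 |s.2.1|) s.2.2
  if result = |s.2.1| then s.2.1 else result

-- ===== PORT B =====
def major_sum_alt (lst : List Int) : Int :=
  let ps := (lst.filter (fun x => x > 0)).sum
  let ns := (lst.filter (fun x => x < 0)).sum
  let zc := ((lst.filter (fun x => x == 0)).length : Int)
  let result := max (max ps (-ns)) zc
  if result = -ns then ns else result

-- ===== PRECONDITION & SPEC =====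
def Spec_major_sum (lst : List Int) (out : Int) : Prop := out = major_sum_alt lst
instance (lst : List Int) (out : Int) : Decidable (Spec_major_sum lst out) := by unfold Spec_major_sum; infer_instance

-- ===== CLAIM (what is proved, stated in full; the proofs are below) =====
def Claim_equal_major_sum : Prop := ∀ (lst : List Int), Dom_major_sum lst → Spec_major_sum lst (major_sum lst)

-- ===== LEMMAS AND PROOFS =====
theorem majorStep_foldl (lst : List Int) (ps ns zc : Int) :
    lst.foldl majorStep (ps, ns, zc) =
      (ps + (lst.filter (fun x => x > 0)).sum,
       ns + (lst.filter (fun x => x < 0)).sum,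
       zc + ((lst.filter (fun x => x == 0)).length : Int)) := by
  induction lst generalizing ps ns zc with
  | nil => simp
  | cons x t ih =>
    simp only [List.foldl_cons, majorStep, List.filter_cons]
    by_cases h1 : x > 0
    · simp [h1, show ¬ x < 0 by omega, show ¬ x == 0 from by simp; omega, ih,
            add_assoc, add_comm, add_left_comm]
    · by_cases h2 : x < 0
      · simp [h1, h2, show ¬ x == 0 from by simp; omega, ih,
              add_assoc, add_comm, add_left_comm]
      · have hx : x = 0 := by omega
        simp [hx, ih, add_assoc, add_comm, add_left_comm]

theorem neg_filter_sum_nonpos (lst : List Int) :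
    (lst.filter (fun x => x < 0)).sum ≤ 0 := by
  induction lst with
  | nil => simp
  | cons x t ih =>
    simp only [List.filter_cons]
    by_cases h : x < 0
    · simp [h]; omega
    · simp [h, ih]

-- ===== VERDICT (by name: the statement is the Claim_ definition above) =====
theorem major_sum_spec : Claim_equal_major_sum := by
  intro lst _
  unfold Spec_major_sum major_sum major_sum_alt
  rw [majorStep_foldl]
  have h := neg_filter_sum_nonpos lst
  simp only [zero_add]
  rw [abs_of_nonpos h]
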